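-- pv_equiv track=rewrite | github.com/JoohyungDev/algorithm | 프로그래머스/lv0/배열 만들기 2.py | solution
-- ===== SOURCE A (Python) =====
-- def solution(l, r):
--     result = []
--     for i in range(l,r+1):
--         if all(digit in '50' for digit in str(i)):
--             result.append(i)
--     if len(result) == 0:
--         result.append(-1)
--     return result
-- ===== SOURCE B (Python) =====
-- def solution(l, r):
--     # Generate every number whose decimal digits are all 0 or 5 (up to 10 digits,
--     # enough for the 32-bit input range), then keep those inside [l, r].
--     cands = [0]
--     level = [5]
--     for _ in range(10):
--         cands += level
--         level = [d for x in level for d in (10 * x, 10 * x + 5)]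
--     res = [x for x in cands if l <= x <= r]
--     return res if res else [-1]
-- ===== Notes on version B (the rewrite author's own statement) =====
-- stated objective: faster
-- what changed: Instead of scanning every integer in [l, r] and testing its decimal string, B combinatorially generates the ~2^11 numbers whose digits are all 0 or 5 (up to 10 digits, enough for the 32-bit input range) in increasing order and filters them to [l, r].
import Mathlib
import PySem

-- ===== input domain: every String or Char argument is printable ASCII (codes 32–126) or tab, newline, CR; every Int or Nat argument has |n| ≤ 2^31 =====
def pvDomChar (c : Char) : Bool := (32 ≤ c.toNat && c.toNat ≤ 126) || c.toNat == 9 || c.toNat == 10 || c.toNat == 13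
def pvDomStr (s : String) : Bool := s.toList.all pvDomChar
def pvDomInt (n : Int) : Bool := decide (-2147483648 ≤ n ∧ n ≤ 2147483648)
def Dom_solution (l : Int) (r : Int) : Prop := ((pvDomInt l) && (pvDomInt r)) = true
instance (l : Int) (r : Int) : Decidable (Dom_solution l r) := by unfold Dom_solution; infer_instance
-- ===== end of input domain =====

-- B generates the ~2^11 numbers whose decimal digits are all 0 or 5 (up to 10 digits,
-- enough for the 32-bit domain) and filters them to [l, r], instead of A's per-integer
-- scan of [l, r]: O(2^d) candidates in place of an O(r-l) scan.


-- ===== PORT A =====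
-- A's test 'all(digit in '50' for digit in str(i))'
def pvGood (i : Int) : Bool :=
  (PySem.Int.toChars i).all (fun d => PySem.Chars.isIn [d] ['5', '0'])

def solution (l : Int) (r : Int) : List Int :=
  let result := (PySem.List.pyRange l (r + 1) 1).foldl
    (fun acc i => if pvGood i then acc ++ [i] else acc) ([] : List Int)
  if result.length = 0 then result ++ [-1] else result

-- ===== PORT B =====
def solution_alt (l : Int) (r : Int) : List Int :=
  let st := (List.range 10).foldl
    (fun (st : List Int × List Int) _ =>
      (st.1 ++ st.2, st.2.flatMap (fun x => [10 * x, 10 * x + 5])))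
    ([0], [5])
  let res := st.1.filter (fun x => decide (l ≤ x) && decide (x ≤ r))
  if res = [] then [-1] else res

-- ===== PRECONDITION & SPEC =====
def Spec_solution (l : Int) (r : Int) (out : List Int) : Prop := out = solution_alt l r
instance (l : Int) (r : Int) (out : List Int) : Decidable (Spec_solution l r out) := by unfold Spec_solution; infer_instance

-- ===== CLAIM (what is proved, stated in full; the proofs are below) =====
def Claim_equal_solution : Prop := ∀ (l : Int) (r : Int), Dom_solution l r → Spec_solution l r (solution l r)

-- ===== LEMMAS AND PROOFS =====

-- arithmetic twin of A's digit test, for nonnegative n: all decimal digits in {0, 5}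
def good05 : Nat → Bool
  | n =>
    if h : n < 10 then (n == 0 || n == 5)
    else ((n % 10 == 0 || n % 10 == 5) && good05 (n / 10))
  decreasing_by exact Nat.div_lt_self (by omega) (by omega)

theorem good05_eq (n : Nat) : good05 n =
    (if n < 10 then (n == 0 || n == 5)
     else ((n % 10 == 0 || n % 10 == 5) && good05 (n / 10))) := by
  rw [good05]; by_cases h : n < 10 <;> simp [h]

-- the k-th generation level of B: exactly the good numbers with k+1 digits
def pvLevel : Nat → List Int
  | 0 => [5]
  | k + 1 => (pvLevel k).flatMap (fun x => [10 * x, 10 * x + 5])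

def pvCands (j : Nat) : List Int := [0] ++ (List.range j).flatMap pvLevel

theorem pv_fold_state (j : Nat) :
    (List.range j).foldl
      (fun (st : List Int × List Int) _ =>
        (st.1 ++ st.2, st.2.flatMap (fun x => [10 * x, 10 * x + 5])))
      ([0], [5]) = (pvCands j, pvLevel j) := by
  induction j with
  | zero => rfl
  | succ j ih =>
    rw [List.range_succ, List.foldl_append, ih]
    simp [pvCands, pvLevel, List.range_succ]

theorem pv_mem_level (k : Nat) (x : Int) :
    x ∈ pvLevel k ↔ ∃ n : Nat, x = (n : Int) ∧ good05 n = true ∧ 10 ^ k ≤ n ∧ n < 10 ^ (k + 1) := by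
  induction k generalizing x with
  | zero =>
    simp only [pvLevel, List.mem_singleton]
    constructor
    · rintro rfl
      exact ⟨5, by norm_num, by rw [good05_eq]; decide, by norm_num, by norm_num⟩
    · rintro ⟨n, rfl, hg, h1, h2⟩
      simp only [pow_zero] at h1 h2
      have h2' : n < 10 := by simpa using h2
      rw [good05_eq, if_pos h2'] at hg
      simp only [Bool.or_eq_true, beq_iff_eq] at hg
      omega
  | succ k ih =>
    have hpow : (10:ℕ) ^ (k + 1) = 10 * 10 ^ k := by ring
    have hpow2 : (10:ℕ) ^ (k + 2) = 10 * 10 ^ (k + 1) := by ring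
    have hp1 : (1:ℕ) ≤ 10 ^ k := Nat.one_le_pow _ _ (by omega)
    simp only [pvLevel, List.mem_flatMap]
    constructor
    · rintro ⟨y, hy, hx⟩
      rcases (ih y).mp hy with ⟨m, rfl, hg, h1, h2⟩
      have hm10 : 10 ≤ 10 * m := by omega
      simp only [List.mem_cons, List.not_mem_nil, or_false] at hx
      rcases hx with rfl | rfl
      · refine ⟨10 * m, by push_cast; ring, ?_, by omega, by omega⟩
        rw [good05_eq, if_neg (by omega)]
        simp only [Nat.mul_mod_right, Nat.mul_div_cancel_left _ (by omega : 0 < 10)]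
        simpa using hg
      · refine ⟨10 * m + 5, by push_cast; ring, ?_, by omega, by omega⟩
        rw [good05_eq, if_neg (by omega)]
        have e1 : (10 * m + 5) % 10 = 5 := by omega
        have e2 : (10 * m + 5) / 10 = m := by omega
        rw [e1, e2]
        simpa using hg
    · rintro ⟨n, rfl, hg, h1, h2⟩
      have hn10 : 10 ≤ n := by omega
      rw [good05_eq, if_neg (by omega)] at hg
      simp only [Bool.and_eq_true, Bool.or_eq_true, beq_iff_eq] at hg
      obtain ⟨hd, hrec⟩ := hg
      refine ⟨((n / 10 : ℕ) : Int), (ih _).mpr ⟨n / 10, rfl, hrec, by omega, by omega⟩, ?_⟩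
      simp only [List.mem_cons, List.not_mem_nil, or_false]
      rcases hd with h0 | h5
      · left; omega
      · right; omega

theorem pv_mem_cands (x : Int) :
    x ∈ pvCands 10 ↔ ∃ n : Nat, x = (n : Int) ∧ good05 n = true ∧ n < 10 ^ 10 := by
  simp only [pvCands, List.cons_append, List.nil_append, List.mem_cons, List.mem_flatMap,
    List.mem_range]
  constructor
  · rintro (rfl | ⟨k, hk, hx⟩)
    · exact ⟨0, by norm_num, by rw [good05_eq]; decide, by norm_num⟩
    · rcases (pv_mem_level k x).mp hx with ⟨n, rfl, hg, h1, h2⟩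
      exact ⟨n, rfl, hg, lt_of_lt_of_le h2 (Nat.pow_le_pow_right (by omega) (by omega))⟩
  · rintro ⟨n, rfl, hg, hlt⟩
    by_cases hn : n = 0
    · left; simp [hn]
    · right
      refine ⟨Nat.log 10 n, ?_, (pv_mem_level _ _).mpr
        ⟨n, rfl, hg, Nat.pow_log_le_self 10 hn, Nat.lt_pow_succ_log_self (by omega) n⟩⟩
      by_contra hk
      have : 10 ^ 10 ≤ 10 ^ Nat.log 10 n := Nat.pow_le_pow_right (by omega) (by omega)
      have := Nat.pow_log_le_self 10 hn
      omega

-- Nat.toDigits plumbing (not in Mathlib): accumulator and fuel normalisation, recursion step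
theorem pv_tdc_acc (b f : Nat) : ∀ (n : Nat) (l : List Char),
    Nat.toDigitsCore b f n l = Nat.toDigitsCore b f n [] ++ l := by
  induction f with
  | zero => intro n l; simp [Nat.toDigitsCore]
  | succ f ih =>
    intro n l
    simp only [Nat.toDigitsCore]
    by_cases h : n / b = 0
    · simp [h]
    · simp only [h, if_false]
      rw [ih (n / b) (Nat.digitChar (n % b) :: l), ih (n / b) [Nat.digitChar (n % b)]]
      simp

theorem pv_tdc_fuel : ∀ (f f' n : Nat), n < f → n < f' → ∀ (l : List Char),
    Nat.toDigitsCore 10 f n l = Nat.toDigitsCore 10 f' n l := by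
  intro f
  induction f with
  | zero => omega
  | succ f ih =>
    intro f' n h h' l
    cases f' with
    | zero => omega
    | succ f' =>
      simp only [Nat.toDigitsCore]
      by_cases h0 : n / 10 = 0
      · simp [h0]
      · simp only [h0, if_false]
        have hn : 0 < n := by omega
        have : n / 10 < n := Nat.div_lt_self hn (by omega)
        exact ih f' (n / 10) (by omega) (by omega) _

theorem pv_toDigits_lt (n : Nat) (h : n < 10) : Nat.toDigits 10 n = [Nat.digitChar n] := by
  unfold Nat.toDigits
  simp only [Nat.toDigitsCore]
  rw [Nat.div_eq_of_lt h, Nat.mod_eq_of_lt h]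
  simp

theorem pv_toDigits_step (n : Nat) (h : 10 ≤ n) :
    Nat.toDigits 10 n = Nat.toDigits 10 (n / 10) ++ [Nat.digitChar (n % 10)] := by
  unfold Nat.toDigits
  simp only [Nat.toDigitsCore]
  have h0 : ¬ n / 10 = 0 := by
    have := Nat.div_le_div_right (c := 10) h; simp at this; omega
  simp only [h0, if_false]
  rw [pv_tdc_acc]
  congr 1
  exact pv_tdc_fuel n (n / 10 + 1) (n / 10)
    (by have := Nat.div_lt_self (by omega : 0 < n) (by omega : 1 < 10); omega) (by omega) []

theorem pv_digitChar_in (d : Nat) (hd : d < 10) :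
    PySem.Chars.isIn [Nat.digitChar d] ['5', '0'] = (d == 0 || d == 5) := by
  interval_cases d <;> decide

theorem pv_good_neg (x : Int) (h : x < 0) : pvGood x = false := by
  unfold pvGood PySem.Int.toChars
  rw [if_pos h]
  simp [List.all_cons]
  intro hc
  exact absurd hc (by decide)

theorem pv_good_natCast (n : Nat) : pvGood (n : Int) = good05 n := by
  have hne : ¬ ((n : Int) < 0) := by omega
  unfold pvGood PySem.Int.toChars
  rw [if_neg hne, Int.toNat_natCast]
  induction n using Nat.strong_induction_on with
  | _ n ih =>
    by_cases h : n < 10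
    · rw [pv_toDigits_lt n h]
      rw [good05_eq, if_pos h]
      simp only [List.all_cons, List.all_nil, Bool.and_true]
      exact pv_digitChar_in n h
    · rw [pv_toDigits_step n (by omega), List.all_append]
      rw [good05_eq, if_neg h]
      have hd : n % 10 < 10 := Nat.mod_lt _ (by omega)
      simp only [List.all_cons, List.all_nil, Bool.and_true]
      rw [pv_digitChar_in _ hd, ih (n / 10) (Nat.div_lt_self (by omega) (by omega)) (by omega)]
      rw [Bool.and_comm]

set_option maxRecDepth 100000 in
theorem pv_cands_chain : (pvCands 10).IsChain (· < ·) := by decide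

theorem pv_cands_pairwise : (pvCands 10).Pairwise (· < ·) :=
  List.IsChain.pairwise pv_cands_chain

theorem pv_filters_eq (l r : Int) (hr : r ≤ 2147483648) :
    (PySem.List.pyRange l (r + 1) 1).filter (fun i => pvGood i) =
      (pvCands 10).filter (fun x => decide (l ≤ x) && decide (x ≤ r)) := by
  have hA : ((PySem.List.pyRange l (r + 1) 1).filter (fun i => pvGood i)).Pairwise (· < ·) :=
    (PySem.List.pairwise_lt_pyRange_one l (r + 1)).filter _
  have hB : ((pvCands 10).filter (fun x => decide (l ≤ x) && decide (x ≤ r))).Pairwise (· < ·) :=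
    pv_cands_pairwise.filter _
  have hmem : ∀ x, x ∈ (PySem.List.pyRange l (r + 1) 1).filter (fun i => pvGood i) ↔
      x ∈ (pvCands 10).filter (fun x => decide (l ≤ x) && decide (x ≤ r)) := by
    intro x
    simp only [List.mem_filter, PySem.List.mem_pyRange_one, Bool.and_eq_true, decide_eq_true_eq]
    constructor
    · rintro ⟨⟨hl, hltr⟩, hg⟩
      have hx0 : 0 ≤ x := by
        by_contra hneg
        rw [pv_good_neg x (by omega)] at hg
        exact absurd hg (by decide)
      have hx : x = ((x.toNat : Nat) : Int) := (Int.toNat_of_nonneg hx0).symm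
      refine ⟨?_, hl, by omega⟩
      rw [hx] at hg ⊢
      rw [pv_good_natCast] at hg
      exact (pv_mem_cands _).mpr ⟨x.toNat, rfl, hg, by norm_num; omega⟩
    · rintro ⟨hc, hl, hler⟩
      rcases (pv_mem_cands x).mp hc with ⟨n, rfl, hg, _⟩
      exact ⟨⟨hl, by omega⟩, by rw [pv_good_natCast]; exact hg⟩
  have hn1 := hA.imp (fun h => ne_of_lt h)
  have hn2 := hB.imp (fun h => ne_of_lt h)
  have hp : ((PySem.List.pyRange l (r + 1) 1).filter (fun i => pvGood i)).Perm
      ((pvCands 10).filter (fun x => decide (l ≤ x) && decide (x ≤ r))) :=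
    List.perm_of_nodup_nodup_toFinset_eq hn1 hn2 (by ext x; simpa using hmem x)
  exact hp.eq_of_pairwise (fun a b _ _ hab hba => absurd hab (lt_asymm hba)) hA hB

-- ===== VERDICT (by name: the statement is the Claim_ definition above) =====
theorem solution_spec : Claim_equal_solution := by
  intro l r hdom
  have hr : r ≤ 2147483648 := by
    simp [Dom_solution, pvDomInt] at hdom; omega
  unfold Spec_solution solution solution_alt
  rw [pv_fold_state]
  simp only []
  rw [PySem.List.foldl_append_if_eq_filter, List.nil_append, ← pv_filters_eq l r hr]
  rcases h : (PySem.List.pyRange l (r + 1) 1).filter (fun i => pvGood i) with _ | ⟨a, t⟩ <;> simp
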